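-- pv_equiv track=rewrite | github.com/kishorebolt03/learn-python-the-hard-way | ITVAC/problem_solving/Rently_min.py | textQueries
-- ===== SOURCE A (Python) =====
-- from collections import defaultdict
--
-- def textQueries(sentences, queries):
--     word_indices = defaultdict(set)
--     for i, s in enumerate(sentences):
--         for w in s.split():
--             word_indices[w].add(i)
--     n=[]
--     for i in [[str(i) for i in sorted(set.intersection(*[word_indices[w] for w in q.split()]))] for q in queries]:
--         n.append(" ".join(i))
--     return n
-- ===== SOURCE B (Python) =====
-- def textQueries(sentences, queries):
--     out = []
--     for q in queries:
--         word_sets = []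
--         for w in q.split():
--             word_sets.append({i for i, s in enumerate(sentences) if w in s.split()})
--         idx = word_sets[0]
--         for ws in word_sets[1:]:
--             idx = idx & ws
--         out.append(" ".join(str(i) for i in sorted(idx)))
--     return out
-- ===== Notes on version B (the rewrite author's own statement) =====
-- stated objective: alternative
-- what changed: B drops A's precomputed inverted index: for each query word it rescans the sentence list collecting the set of matching indices and intersects these per-word sets directly.
import Mathlib
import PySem

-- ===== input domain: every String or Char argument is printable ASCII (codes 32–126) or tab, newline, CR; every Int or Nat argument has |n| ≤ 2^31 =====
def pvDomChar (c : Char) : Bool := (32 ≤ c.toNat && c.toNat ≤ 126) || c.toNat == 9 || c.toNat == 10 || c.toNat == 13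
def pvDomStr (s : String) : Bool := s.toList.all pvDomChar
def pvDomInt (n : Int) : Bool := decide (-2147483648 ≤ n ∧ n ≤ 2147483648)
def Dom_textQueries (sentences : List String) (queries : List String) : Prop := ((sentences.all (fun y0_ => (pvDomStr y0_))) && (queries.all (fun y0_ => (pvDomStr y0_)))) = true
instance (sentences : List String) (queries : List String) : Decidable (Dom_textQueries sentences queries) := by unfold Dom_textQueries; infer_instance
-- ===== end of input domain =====

-- B drops A's precomputed inverted index and rescans the sentence list per query word
-- (objective: alternative decomposition, same results; equivalence of RETURN values proved below).

-- ===== PORT A =====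
-- word_indices: defaultdict(set) filled over enumerate(sentences); word_indices[w].add(i)
def pvIndexA (sentences : List String) : PySem.Dict String (PySem.Set Int) :=
  (PySem.List.enumerate sentences).foldl
    (fun d p => (PySem.Str.split₀ p.2).foldl
      (fun d w => d.modify w [] (fun t => PySem.Set.add t p.1)) d)
    PySem.Dict.empty

-- set.intersection(*sets); on [] Python raises TypeError (excluded by Pre_), total form returns []
def pvInterStar (sets : List (PySem.Set Int)) : PySem.Set Int :=
  match sets with
  | [] => []
  | s :: rest => rest.foldl PySem.Set.inter s

def textQueries (sentences : List String) (queries : List String) : List String :=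
  let wi := pvIndexA sentences
  queries.map (fun q =>
    PySem.Str.join " "
      ((PySem.List.sorted
          (pvInterStar ((PySem.Str.split₀ q).map (fun w => wi.getD w [])))
          (fun x => x) false).map (fun i => PySem.Int.toStr i)))

-- ===== PORT B =====
-- {i for i, s in enumerate(sentences) if w in s.split()}
def pvWordSet (sentences : List String) (w : String) : PySem.Set Int :=
  (PySem.List.enumerate sentences).foldl
    (fun acc p => if w ∈ PySem.Str.split₀ p.2 then PySem.Set.add acc p.1 else acc) []

def textQueries_alt (sentences : List String) (queries : List String) : List String :=
  queries.map (fun q =>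
    let idx : PySem.Set Int :=
      match (PySem.Str.split₀ q).map (fun w => pvWordSet sentences w) with
      | [] => []                        -- Python: word_sets[0] raises IndexError (excluded by Pre_)
      | s :: rest => rest.foldl (fun a b => PySem.Set.inter a b) s
    PySem.Str.join " "
      ((PySem.List.sorted idx (fun x => x) false).map (fun i => PySem.Int.toStr i)))

-- ===== PRECONDITION & SPEC =====
-- Pre_ excludes inputs where some query has no words: there A raises TypeError
-- (set.intersection with no arguments) and B raises IndexError.
def Pre_textQueries (sentences : List String) (queries : List String) : Prop :=
  ∀ q ∈ queries, PySem.Str.split₀ q ≠ []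
instance (sentences : List String) (queries : List String) : Decidable (Pre_textQueries sentences queries) := by unfold Pre_textQueries; infer_instance

def pvWitness_textQueries : List String × List String :=
  (["a b", "b c", "a c b"], ["b", "a b", "c z"])

def Spec_textQueries (sentences : List String) (queries : List String) (out : List String) : Prop := out = textQueries_alt sentences queries
instance (sentences : List String) (queries : List String) (out : List String) : Decidable (Spec_textQueries sentences queries out) := by unfold Spec_textQueries; infer_instance

-- ===== CLAIM (what is proved, stated in full; the proofs are below) =====
def Claim_equal_textQueries : Prop := ∀ (sentences : List String) (queries : List String), Dom_textQueries sentences queries → Pre_textQueries sentences queries → Spec_textQueries sentences queries (textQueries sentences queries)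

-- ===== LEMMAS AND PROOFS =====

-- inner loop of A: effect on one key
theorem pvInnerA (ws : List String) (d : PySem.Dict String (PySem.Set Int)) (i : Int) (w : String) :
    ((ws.foldl (fun d u => d.modify u [] (fun t => PySem.Set.add t i)) d).getD w [])
      = if w ∈ ws then PySem.Set.add (d.getD w []) i else d.getD w [] := by
  induction ws generalizing d with
  | nil => simp
  | cons u rest ih =>
    simp only [List.foldl_cons, ih, PySem.Dict.getD_modify, List.mem_cons]
    by_cases hu : w = u
    · simp [hu]
    · by_cases hr : w ∈ rest <;> simp [hu, hr]

-- outer loop of A: looking up w in the built index is B's per-word scan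
theorem pvOuterA (ps : List (Int × String)) (d : PySem.Dict String (PySem.Set Int)) (w : String) :
    ((ps.foldl (fun d p => (PySem.Str.split₀ p.2).foldl
        (fun d u => d.modify u [] (fun t => PySem.Set.add t p.1)) d) d).getD w [])
      = ps.foldl (fun acc p => if w ∈ PySem.Str.split₀ p.2 then PySem.Set.add acc p.1 else acc)
          (d.getD w []) := by
  induction ps generalizing d with
  | nil => rfl
  | cons p rest ih =>
    simp only [List.foldl_cons, ih, pvInnerA]

theorem pvIndex_getD (sentences : List String) (w : String) :
    (pvIndexA sentences).getD w [] = pvWordSet sentences w := by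
  unfold pvIndexA pvWordSet
  rw [pvOuterA]
  simp [PySem.Dict.getD_empty]

-- ===== VERDICT (by name: the statement is the Claim_ definition above) =====
theorem textQueries_spec : Claim_equal_textQueries := by
  intro sentences queries _ _
  unfold Spec_textQueries textQueries textQueries_alt
  apply List.map_congr_left
  intro q _
  have h : (PySem.Str.split₀ q).map (fun w => (pvIndexA sentences).getD w [])
      = (PySem.Str.split₀ q).map (fun w => pvWordSet sentences w) := by
    apply List.map_congr_left
    intro w _
    exact pvIndex_getD sentences w
  rw [h]
  unfold pvInterStar
  cases (PySem.Str.split₀ q).map (fun w => pvWordSet sentences w) <;> rfl
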